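-- pv_equiv track=rewrite | github.com/IhsanKabir/Aviation-Inventory-Pricing-Intelligence-Using-CatBoost-LightGBM-MLP | apps/api/app/repositories/access_requests.py | _normalize_code_list
-- ===== SOURCE A (Python) =====
-- from typing import Any
--
-- def _normalize_code_list(values: Any) -> list[str]:
--     if not values:
--         return []
--     normalized = {
--         str(value or "").strip().upper()
--         for value in values
--         if str(value or "").strip()
--     }
--     return sorted(normalized)
-- ===== SOURCE B (Python) =====
-- from typing import Any
--
-- def _merge(a: list[str], b: list[str]) -> list[str]:
--     out = []
--     i = j = 0
--     while i < len(a) and j < len(b):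
--         x, y = a[i], b[j]
--         if x < y:
--             out.append(x); i += 1
--         elif y < x:
--             out.append(y); j += 1
--         else:  # equal: keep one copy, drop the duplicate
--             out.append(x); i += 1; j += 1
--     out.extend(a[i:])
--     out.extend(b[j:])
--     return out
--
-- def _msort(xs: list[str]) -> list[str]:
--     if len(xs) <= 1:
--         return xs
--     mid = len(xs) // 2
--     return _merge(_msort(xs[:mid]), _msort(xs[mid:]))
--
-- def _normalize_code_list(values: Any) -> list[str]:
--     if not values:
--         return []
--     codes = [s for s in (str(v or "").strip().upper() for v in values) if s]
--     return _msort(codes)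
-- ===== Notes on version B (the rewrite author's own statement) =====
-- stated objective: alternative
-- what changed: A dedupes with a set comprehension and then calls the library sort on the set; B uses no set and no library sort: it recursively merge-sorts the normalized codes with a merge step that drops duplicates when the two heads compare equal, so deduplication happens inside the divide-and-conquer merges.
import Mathlib
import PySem

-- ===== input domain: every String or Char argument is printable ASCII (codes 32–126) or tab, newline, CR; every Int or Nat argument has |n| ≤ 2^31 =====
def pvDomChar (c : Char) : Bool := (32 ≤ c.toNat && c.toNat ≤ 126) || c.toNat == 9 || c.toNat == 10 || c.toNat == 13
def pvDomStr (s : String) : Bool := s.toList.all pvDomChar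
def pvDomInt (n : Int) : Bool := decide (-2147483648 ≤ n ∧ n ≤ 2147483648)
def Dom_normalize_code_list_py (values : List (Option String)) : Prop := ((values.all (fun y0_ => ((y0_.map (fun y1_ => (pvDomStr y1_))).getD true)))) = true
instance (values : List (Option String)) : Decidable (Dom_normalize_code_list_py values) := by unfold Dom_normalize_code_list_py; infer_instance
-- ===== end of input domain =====

-- B replaces A's set-comprehension-then-library-sort by a recursive dedup-mergesort (the merge drops equal heads); return values proved equal.

-- ===== PORT A =====
-- A: set comprehension over values (condition: stripped string nonempty; element: stripped-uppercased), then sorted(set)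
def normalize_code_list_py (values : List (Option String)) : List String :=
  if values = [] then []
  else
    let normalized : PySem.Set String :=
      values.foldl (fun s v =>
        if PySem.Str.strip (v.getD "") ≠ "" then
          PySem.Set.add s (PySem.Str.upper (PySem.Str.strip (v.getD "")))
        else s) PySem.Set.empty
    PySem.List.sorted normalized (fun x => x) false

-- ===== PORT B =====
-- B helper _merge: two-pointer merge; equal heads emit one copy and advance both sides
def pvMerge : List String → List String → List String
  | [], b => b
  | a, [] => a
  | x :: a', y :: b' =>
      if x < y then x :: pvMerge a' (y :: b')
      else if y < x then y :: pvMerge (x :: a') b'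
      else x :: pvMerge a' b'
  termination_by a b => a.length + b.length

-- B helper _msort: split at the midpoint, recurse, merge
def pvMsort (xs : List String) : List String :=
  if xs.length ≤ 1 then xs
  else pvMerge (pvMsort (xs.take (xs.length / 2))) (pvMsort (xs.drop (xs.length / 2)))
  termination_by xs.length
  decreasing_by
  · simp only [List.length_take]; omega
  · simp only [List.length_drop]; omega

-- B: normalize into a plain list (comprehension: map then keep nonempty), then dedup-mergesort it
def normalize_code_list_py_alt (values : List (Option String)) : List String :=
  if values = [] then []
  else
    pvMsort (((values.map (fun v => PySem.Str.upper (PySem.Str.strip (v.getD "")))).filter (fun s => s ≠ "")))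

-- ===== PRECONDITION & SPEC =====
def Spec_normalize_code_list_py (values : List (Option String)) (out : List String) : Prop := out = normalize_code_list_py_alt values
instance (values : List (Option String)) (out : List String) : Decidable (Spec_normalize_code_list_py values out) := by unfold Spec_normalize_code_list_py; infer_instance

-- ===== CLAIM (what is proved, stated in full; the proofs are below) =====
def Claim_equal_normalize_code_list_py : Prop := ∀ (values : List (Option String)), Dom_normalize_code_list_py values → Spec_normalize_code_list_py values (normalize_code_list_py values)

-- ===== LEMMAS AND PROOFS =====

theorem upper_eq_empty (s : String) : PySem.Str.upper s = "" ↔ s = "" := by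
  constructor
  · intro h
    have := congrArg String.toList h
    rw [PySem.Str.toList_upper] at this
    simp [PySem.Chars.upper] at this
    exact this
  · intro h; subst h; rfl

-- merging two strictly sorted lists yields a strictly sorted list whose members are the union
theorem pvMerge_spec : ∀ (a b : List String), a.Pairwise (· < ·) → b.Pairwise (· < ·) →
    (pvMerge a b).Pairwise (· < ·) ∧ ∀ y, y ∈ pvMerge a b ↔ y ∈ a ∨ y ∈ b := by
  intro a
  induction a with
  | nil => intro b _ hb; simpa [pvMerge] using hb
  | cons x a' iha =>
      intro b
      induction b with
      | nil => intro ha _; simpa [pvMerge] using ha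
      | cons y b' ihb =>
          intro ha hb
          rcases List.pairwise_cons.mp ha with ⟨hxa, ha'⟩
          rcases List.pairwise_cons.mp hb with ⟨hyb, hb'⟩
          by_cases hxy : x < y
          · rw [show pvMerge (x :: a') (y :: b') = x :: pvMerge a' (y :: b') by
              rw [pvMerge]; simp [hxy]]
            rcases iha (y :: b') ha' hb with ⟨hp, hm⟩
            constructor
            · rw [List.pairwise_cons]
              refine ⟨?_, hp⟩
              intro z hz
              rcases (hm z).mp hz with h | h
              · exact hxa z h
              · rcases List.mem_cons.mp h with h | h
                · exact h ▸ hxy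
                · exact lt_trans hxy (hyb z h)
            · intro z; simp [hm z]; tauto
          · by_cases hyx : y < x
            · rw [show pvMerge (x :: a') (y :: b') = y :: pvMerge (x :: a') b' by
                rw [pvMerge]; simp [hxy, hyx]]
              rcases ihb ha hb' with ⟨hp, hm⟩
              constructor
              · rw [List.pairwise_cons]
                refine ⟨?_, hp⟩
                intro z hz
                rcases (hm z).mp hz with h | h
                · rcases List.mem_cons.mp h with h | h
                  · exact h ▸ hyx
                  · exact lt_trans hyx (hxa z h)
                · exact hyb z h
              · intro z; simp [hm z]; tauto
            · have hxy' : x = y := le_antisymm (not_lt.mp hyx) (not_lt.mp hxy)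
              rw [show pvMerge (x :: a') (y :: b') = x :: pvMerge a' b' by
                rw [pvMerge]; simp [hxy, hyx]]
              rcases iha b' ha' hb' with ⟨hp, hm⟩
              constructor
              · rw [List.pairwise_cons]
                refine ⟨?_, hp⟩
                intro z hz
                rcases (hm z).mp hz with h | h
                · exact hxa z h
                · exact hxy' ▸ hyb z h
              · intro z
                simp only [List.mem_cons, hm z]
                subst hxy'
                tauto

-- dedup-mergesort yields a strictly sorted list with the same members
theorem pvMsort_spec : ∀ (n : Nat) (xs : List String), xs.length ≤ n →
    (pvMsort xs).Pairwise (· < ·) ∧ ∀ y, y ∈ pvMsort xs ↔ y ∈ xs := by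
  intro n
  induction n with
  | zero =>
      intro xs h
      have : xs = [] := List.eq_nil_of_length_eq_zero (Nat.le_zero.mp h)
      subst this
      simp [pvMsort]
  | succ n ih =>
      intro xs h
      rw [pvMsort]
      by_cases h1 : xs.length ≤ 1
      · rw [if_pos h1]
        match xs, h1 with
        | [], _ => simp
        | [a], _ => simp
      · rw [if_neg h1]
        have ht : (xs.take (xs.length / 2)).length ≤ n := by
          simp only [List.length_take]; omega
        have hd : (xs.drop (xs.length / 2)).length ≤ n := by
          simp only [List.length_drop]; omega
        rcases ih _ ht with ⟨hpt, hmt⟩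
        rcases ih _ hd with ⟨hpd, hmd⟩
        rcases pvMerge_spec _ _ hpt hpd with ⟨hp, hm⟩
        refine ⟨hp, fun y => ?_⟩
        rw [hm y, hmt y, hmd y]
        conv_rhs => rw [← List.take_append_drop (xs.length / 2) xs]
        exact List.mem_append.symm

-- membership of A's set fold
theorem foldA_mem (values : List (Option String)) (s0 : PySem.Set String) (y : String) :
    y ∈ values.foldl (fun s v =>
        if PySem.Str.strip (v.getD "") ≠ "" then
          PySem.Set.add s (PySem.Str.upper (PySem.Str.strip (v.getD "")))
        else s) s0
    ↔ y ∈ s0 ∨ ∃ v ∈ values, PySem.Str.strip (v.getD "") ≠ "" ∧ y = PySem.Str.upper (PySem.Str.strip (v.getD "")) := by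
  induction values generalizing s0 with
  | nil => simp
  | cons v vs ih =>
      simp only [List.foldl_cons]
      by_cases hs : PySem.Str.strip (v.getD "") = ""
      · rw [if_neg (by simp [hs])]
        rw [ih s0]
        simp [hs]
      · rw [if_pos hs]
        rw [ih _]
        rw [PySem.Set.mem_add]
        simp only [List.mem_cons]
        constructor
        · rintro (⟨h | h⟩ | h)
          · exact Or.inl h
          · exact Or.inr ⟨v, Or.inl rfl, hs, h⟩
          · rcases h with ⟨w, hw, h1, h2⟩; exact Or.inr ⟨w, Or.inr hw, h1, h2⟩
        · rintro (h | ⟨w, (rfl | hw), h1, h2⟩)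
          · exact Or.inl (Or.inl h)
          · exact Or.inl (Or.inr h2)
          · exact Or.inr ⟨w, hw, h1, h2⟩

-- A's fold keeps the set duplicate-free
theorem foldA_nodup (values : List (Option String)) (s0 : PySem.Set String) (h : s0.Nodup) :
    (values.foldl (fun s v =>
        if PySem.Str.strip (v.getD "") ≠ "" then
          PySem.Set.add s (PySem.Str.upper (PySem.Str.strip (v.getD "")))
        else s) s0).Nodup := by
  induction values generalizing s0 with
  | nil => exact h
  | cons v vs ih =>
      simp only [List.foldl_cons]
      split
      · exact ih _ (PySem.Set.nodup_add _ _ h)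
      · exact ih _ h

-- ===== VERDICT (by name: the statement is the Claim_ definition above) =====
theorem normalize_code_list_py_spec : Claim_equal_normalize_code_list_py := by
  intro values _
  unfold Spec_normalize_code_list_py normalize_code_list_py normalize_code_list_py_alt
  split
  · rfl
  · simp only []
    set L := (values.map (fun v => PySem.Str.upper (PySem.Str.strip (v.getD "")))).filter (fun s => s ≠ "") with hL
    set S := values.foldl (fun s v =>
        if PySem.Str.strip (v.getD "") ≠ "" then
          PySem.Set.add s (PySem.Str.upper (PySem.Str.strip (v.getD "")))
        else s) PySem.Set.empty with hS
    rcases pvMsort_spec L.length L le_rfl with ⟨hp, hm⟩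
    have hmem : ∀ y, y ∈ pvMsort L ↔ y ∈ S := by
      intro y
      rw [hm y, hS, foldA_mem values PySem.Set.empty y, hL]
      simp only [List.mem_filter, List.mem_map, PySem.Set.empty, List.not_mem_nil, false_or]
      constructor
      · rintro ⟨⟨v, hv, rfl⟩, hne⟩
        refine ⟨v, hv, ?_, rfl⟩
        intro h0
        have hne' : PySem.Str.upper (PySem.Str.strip (v.getD "")) ≠ "" := by simpa using hne
        exact hne' ((upper_eq_empty _).mpr h0)
      · rintro ⟨v, hv, hne, rfl⟩
        refine ⟨⟨v, hv, rfl⟩, ?_⟩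
        simpa using show PySem.Str.upper (PySem.Str.strip (v.getD "")) ≠ "" from
          fun h => hne ((upper_eq_empty _).mp h)
    have hnodupS : S.Nodup := foldA_nodup values PySem.Set.empty (by simp [PySem.Set.empty])
    have hnodupR : (pvMsort L).Nodup := hp.imp ne_of_lt
    have hperm : (pvMsort L).Perm S :=
      (List.perm_ext_iff_of_nodup hnodupR hnodupS).mpr hmem
    exact PySem.List.sorted_eq_of_perm_of_pairwise_lt _ _ (fun x => x) hperm hp
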